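-- pv_equiv track=rewrite | github.com/gupta1123/socialmedia1 | services/socialpython/compiler/archive_notebook_bridge.py | find_available_fact_for_copy
-- ===== SOURCE A (Python) =====
-- def find_available_fact_for_copy(value: str, available_facts: list[dict[str, str]]) -> dict[str, str] | None:
--     normalized = value.strip()
--     if not normalized:
--         return None
--     exact_matches = [fact for fact in available_facts if fact["copy"] == normalized]
--     if exact_matches:
--         return exact_matches[0]
--
--     containing_matches = [
--         fact
--         for fact in available_facts
--         if normalized in fact["copy"] or fact["copy"] in normalized
--     ]
--     if containing_matches:
--         return max(containing_matches, key=lambda fact: len(fact["copy"]))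
--
--     for fact in available_facts:
--         copy = fact["copy"]
--         if normalized == copy or normalized in copy or copy in normalized:
--             return fact
--     return None
-- ===== SOURCE B (Python) =====
-- def find_available_fact_for_copy(value: str, available_facts: list[dict[str, str]]) -> dict[str, str] | None:
--     normalized = value.strip()
--     if not normalized:
--         return None
--     exact = None
--     best = None
--     for fact in available_facts:
--         copy = fact["copy"]
--         if exact is None and copy == normalized:
--             exact = fact
--         if normalized in copy or copy in normalized:
--             if best is None or len(best["copy"]) < len(copy):
--                 best = fact
--     return exact if exact is not None else best
-- ===== Notes on version B (the rewrite author's own statement) =====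
-- stated objective: simpler
-- what changed: Replaces A's three sequential passes (exact-match filter, containing filter plus max-by-len, and a dead final loop) with a single loop over available_facts maintaining two accumulators: the first exact match and the longest-copy containing match (first wins on ties).
import Mathlib
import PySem

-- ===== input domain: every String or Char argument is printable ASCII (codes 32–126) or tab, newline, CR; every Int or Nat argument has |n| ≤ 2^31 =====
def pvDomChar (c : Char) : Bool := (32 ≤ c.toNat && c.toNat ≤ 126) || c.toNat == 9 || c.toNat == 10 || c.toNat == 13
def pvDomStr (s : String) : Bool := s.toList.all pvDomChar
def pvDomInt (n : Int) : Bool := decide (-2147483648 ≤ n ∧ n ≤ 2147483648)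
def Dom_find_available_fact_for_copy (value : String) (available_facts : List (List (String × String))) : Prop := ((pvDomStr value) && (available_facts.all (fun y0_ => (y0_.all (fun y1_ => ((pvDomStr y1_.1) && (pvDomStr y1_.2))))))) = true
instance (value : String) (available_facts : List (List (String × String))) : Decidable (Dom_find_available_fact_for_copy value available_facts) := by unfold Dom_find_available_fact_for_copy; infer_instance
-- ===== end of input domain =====

-- B replaces A's three sequential passes by ONE loop keeping the first exact match and the longest containing match (simpler).

-- fact["copy"]: first-match association-list lookup; the "" default is unreachable under Pre_ (Python raises KeyError there)
def pvCopy (f : List (String × String)) : String :=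
  (((f.find? (fun kv => kv.1 == "copy")).map (fun kv => kv.2)).getD "")

-- ===== PORT A =====
def find_available_fact_for_copy (value : String) (available_facts : List (List (String × String))) : Option (List (String × String)) :=
  let normalized := PySem.Str.strip value
  if normalized = "" then none
  else
    let exact_matches := available_facts.filter (fun fact => pvCopy fact == normalized)
    match exact_matches with
    | fact :: _ => some fact
    | [] =>
      let containing_matches := available_facts.filter
        (fun fact => PySem.Str.isIn normalized (pvCopy fact) || PySem.Str.isIn (pvCopy fact) normalized)
      if containing_matches.isEmpty then
        -- the final for-loop: return the first fact matching, else None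
        available_facts.find?
          (fun fact => normalized == pvCopy fact || PySem.Str.isIn normalized (pvCopy fact) ||
            PySem.Str.isIn (pvCopy fact) normalized)
      else
        PySem.List.max? containing_matches (fun fact => PySem.Str.len (pvCopy fact))

-- ===== PORT B =====
def pvStepB (normalized : String)
    (st : Option (List (String × String)) × Option (List (String × String)))
    (fact : List (String × String)) :
    Option (List (String × String)) × Option (List (String × String)) :=
  let copy := pvCopy fact
  let ex := if st.1.isNone && copy == normalized then some fact else st.1
  let best :=
    if PySem.Str.isIn normalized copy || PySem.Str.isIn copy normalized then
      match st.2 with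
      | none => some fact
      | some m => if PySem.Str.len (pvCopy m) < PySem.Str.len copy then some fact else some m
    else st.2
  (ex, best)

def find_available_fact_for_copy_alt (value : String) (available_facts : List (List (String × String))) : Option (List (String × String)) :=
  let normalized := PySem.Str.strip value
  if normalized = "" then none
  else
    let st := available_facts.foldl (pvStepB normalized) (none, none)
    match st.1 with
    | some fact => some fact
    | none => st.2

-- ===== PRECONDITION & SPEC =====
-- Pre_ excludes exactly the inputs where Python A raises KeyError: a fact without a "copy" key
-- while the stripped value is nonempty (B raises the same KeyError there).
def Pre_find_available_fact_for_copy (value : String) (available_facts : List (List (String × String))) : Prop :=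
  PySem.Str.strip value = "" ∨
    ∀ fact ∈ available_facts, (fact.find? (fun kv => kv.1 == "copy")).isSome
instance (value : String) (available_facts : List (List (String × String))) : Decidable (Pre_find_available_fact_for_copy value available_facts) := by unfold Pre_find_available_fact_for_copy; infer_instance

def pvWitness_find_available_fact_for_copy : String × (List (List (String × String))) :=
  (" hat ", [[("copy", "a hat!")], [("copy", "hat")]])

def Spec_find_available_fact_for_copy (value : String) (available_facts : List (List (String × String))) (out : Option (List (String × String))) : Prop := out = find_available_fact_for_copy_alt value available_facts
instance (value : String) (available_facts : List (List (String × String))) (out : Option (List (String × String))) : Decidable (Spec_find_available_fact_for_copy value available_facts out) := by unfold Spec_find_available_fact_for_copy; infer_instance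

-- ===== CLAIM (what is proved, stated in full; the proofs are below) =====
def Claim_equal_find_available_fact_for_copy : Prop := ∀ (value : String) (available_facts : List (List (String × String))), Dom_find_available_fact_for_copy value available_facts → Pre_find_available_fact_for_copy value available_facts → Spec_find_available_fact_for_copy value available_facts (find_available_fact_for_copy value available_facts)

-- ===== LEMMAS AND PROOFS =====

-- first component of B's fold = head of A's exact-match filter (seeded with any previous exact match)
theorem pvFold_fst (normalized : String) (fs : List (List (String × String)))
    (ex best : Option (List (String × String))) :
    (fs.foldl (pvStepB normalized) (ex, best)).1 =
      ex.or ((fs.filter (fun fact => pvCopy fact == normalized)).head?) := by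
  induction fs generalizing ex best with
  | nil => cases ex <;> simp
  | cons f t ih =>
    simp only [List.foldl_cons, List.filter_cons]
    cases ex with
    | none =>
      by_cases h : (pvCopy f == normalized) = true
      · simp [pvStepB, h, ih]
      · simp only [Bool.not_eq_true] at h
        simp [pvStepB, h, ih]
    | some e => simp [pvStepB, ih]

-- second component of B's fold = the max?-fold over A's containing-match filter
theorem pvFold_snd (normalized : String) (fs : List (List (String × String)))
    (ex best : Option (List (String × String))) :
    (fs.foldl (pvStepB normalized) (ex, best)).2 =
      (fs.filter (fun fact => PySem.Str.isIn normalized (pvCopy fact) ||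
          PySem.Str.isIn (pvCopy fact) normalized)).foldl
        (fun acc x =>
          match acc with
          | none => some x
          | some m => if PySem.Str.len (pvCopy m) < PySem.Str.len (pvCopy x) then some x else some m)
        best := by
  induction fs generalizing ex best with
  | nil => simp
  | cons f t ih =>
    simp only [List.foldl_cons, List.filter_cons]
    simp only [PySem.Str.isIn] at *
    by_cases h : (PySem.Chars.isIn normalized.toList (pvCopy f).toList ||
        PySem.Chars.isIn (pvCopy f).toList normalized.toList) = true
    · cases best with
      | none => simp [pvStepB, PySem.Str.isIn, h, ih]
      | some m => simp [pvStepB, PySem.Str.isIn, h, ih]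
    · simp only [Bool.not_eq_true] at h
      simp [pvStepB, PySem.Str.isIn, h, ih]

-- the core agreement, for an arbitrary nonempty normalized string
theorem pvAgree (normalized : String) (facts : List (List (String × String))) :
    (match facts.filter (fun fact => pvCopy fact == normalized) with
     | fact :: _ => some fact
     | [] =>
       if (facts.filter (fun fact => PySem.Str.isIn normalized (pvCopy fact) ||
             PySem.Str.isIn (pvCopy fact) normalized)).isEmpty then
         facts.find? (fun fact => normalized == pvCopy fact ||
           PySem.Str.isIn normalized (pvCopy fact) || PySem.Str.isIn (pvCopy fact) normalized)
       else
         PySem.List.max? (facts.filter (fun fact => PySem.Str.isIn normalized (pvCopy fact) ||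
             PySem.Str.isIn (pvCopy fact) normalized)) (fun fact => PySem.Str.len (pvCopy fact))) =
    (match (facts.foldl (pvStepB normalized) (none, none)).1 with
     | some fact => some fact
     | none => (facts.foldl (pvStepB normalized) (none, none)).2) := by
  have hfst := pvFold_fst normalized facts none none
  have hsnd := pvFold_snd normalized facts none none
  simp only [Option.none_or] at hfst
  cases hex : (facts.filter (fun fact => pvCopy fact == normalized)) with
  | cons f t =>
    rw [hex] at hfst
    simp only [List.head?_cons] at hfst
    simp only [hfst]
  | nil =>
    rw [hex] at hfst
    simp only [List.head?_nil] at hfst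
    simp only [hfst]
    cases hcont : (facts.filter (fun fact => PySem.Str.isIn normalized (pvCopy fact) ||
        PySem.Str.isIn (pvCopy fact) normalized)) with
    | nil =>
      rw [hcont] at hsnd
      simp only [List.foldl_nil] at hsnd
      simp only [List.isEmpty_nil, if_true, hsnd]
      rw [List.find?_eq_none]
      intro fact hmem
      have h1 := List.filter_eq_nil_iff.mp hex fact hmem
      have h2 := List.filter_eq_nil_iff.mp hcont fact hmem
      simp only [Bool.or_eq_true, not_or, Bool.not_eq_true] at h1 h2 ⊢
      refine ⟨⟨?_, h2.1⟩, h2.2⟩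
      simp only [beq_eq_false_iff_ne] at h1 ⊢
      exact fun e => h1 e.symm
    | cons c ct =>
      rw [hcont] at hsnd
      simp only [List.isEmpty_cons, Bool.false_eq_true, if_false, hsnd]
      simp only [PySem.List.max?]
      congr 1
      funext acc x
      cases acc with
      | none => rfl
      | some m => exact if_congr Iff.rfl rfl rfl

-- ===== VERDICT (by name: the statement is the Claim_ definition above) =====
theorem find_available_fact_for_copy_spec : Claim_equal_find_available_fact_for_copy := by
  intro value facts _hdom _hpre
  unfold Spec_find_available_fact_for_copy
  unfold find_available_fact_for_copy find_available_fact_for_copy_alt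
  by_cases hempty : PySem.Str.strip value = ""
  · simp only [hempty, if_true]
  · simp only [hempty, if_false]
    exact pvAgree (PySem.Str.strip value) facts
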